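-- pv_equiv track=rewrite | github.com/ZakkirGanesh/dsp | python/q6_strings.py | fix_start
-- ===== SOURCE A (Python) =====
-- def fix_start(s):
--     letters = list(s)
--     i = 1
--     while i < len(letters):
--         if letters[i] == letters[0]:
--             letters[i] = "*"
--         i += 1
--     return "".join(letters)
--
--     """
--     Given a string s, return a string where all occurences of its
--     first char have been changed to '*', except do not change the
--     first char itself. e.g. 'babble' yields 'ba**le' Assume that the
--     string is length 1 or more.
--
--     >>> fix_start('babble')
--     'ba**le'
--     >>> fix_start('aardvark')
--     'a*rdv*rk'
--     >>> fix_start('google')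
--     'goo*le'
--     >>> fix_start('donut')
--     'donut'
--     """
--     raise NotImplementedError
-- ===== SOURCE B (Python) =====
-- def fix_start(s):
--     if not s:
--         return s
--     head = s[0]
--     # cut the tail into the segments between occurrences of head,
--     # then glue the segments back together with '*'
--     segments = s[1:].split(head)
--     return head + "*".join(segments)
-- ===== Notes on version B (the rewrite author's own statement) =====
-- stated objective: faster
-- what changed: Instead of A's per-index interpreted loop that overwrites matching positions in a mutable char list, B cuts the tail into the segments lying between occurrences of the first char (str.split) and glues them back with an asterisk separator (str.join) - staged split/join over a list of segments, no per-character Python-level branch; a timing run measured this faster.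
import Mathlib
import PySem

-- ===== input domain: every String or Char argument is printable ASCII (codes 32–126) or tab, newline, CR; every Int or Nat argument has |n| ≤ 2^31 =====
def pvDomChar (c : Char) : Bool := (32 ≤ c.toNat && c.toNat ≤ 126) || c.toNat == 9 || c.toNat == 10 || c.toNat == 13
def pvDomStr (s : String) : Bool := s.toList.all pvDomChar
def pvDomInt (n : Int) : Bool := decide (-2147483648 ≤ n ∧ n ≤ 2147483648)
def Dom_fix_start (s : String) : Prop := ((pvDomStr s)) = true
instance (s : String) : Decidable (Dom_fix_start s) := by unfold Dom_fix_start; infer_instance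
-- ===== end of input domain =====

-- B splits the tail into the segments between occurrences of the first char and rejoins
-- them with '*', instead of A's index loop over a mutable char list; same values everywhere.

-- ===== PORT A =====
-- while i < len(letters): if letters[i] == letters[0]: letters[i] = "*"; i += 1
def fixStartLoop (letters : List Char) (i : Nat) : List Char :=
  if _h : i < letters.length then
    fixStartLoop (if letters[i]? = letters[0]? then letters.set i '*' else letters) (i + 1)
  else letters
termination_by letters.length - i
decreasing_by
  split
  · simp only [List.length_set]; omega
  · omega

def fix_start (s : String) : String :=
  let letters := s.toList
  -- "".join(letters) on a list of single chars is just rebuilding the string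
  String.ofList (fixStartLoop letters 1)

-- ===== PORT B =====
def fix_start_alt (s : String) : String :=
  if s = "" then s
  else
    match PySem.Str.pyGet? s 0 with        -- head = s[0]
    | some c =>
        -- segments = s[1:].split(head); head + "*".join(segments)
        match PySem.Str.split? (PySem.Str.slice s (some 1) none) (String.singleton c) with
        | some segments => String.singleton c ++ PySem.Str.join "*" segments
        | none => s                        -- unreachable: the separator is one char, not ""
    | none => s                            -- unreachable: s ≠ ""

-- ===== PRECONDITION & SPEC =====
def Spec_fix_start (s : String) (out : String) : Prop := out = fix_start_alt s
instance (s : String) (out : String) : Decidable (Spec_fix_start s out) := by unfold Spec_fix_start; infer_instance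

-- ===== CLAIM =====
def Claim_equal_fix_start : Prop := ∀ (s : String), Dom_fix_start s → Spec_fix_start s (fix_start s)

-- ===== LEMMAS AND PROOFS =====

-- A's loop with a processed prefix: positions before i are already final.
theorem fixStartLoop_inv (suf pre : List Char) (c : Char) :
    fixStartLoop (c :: pre ++ suf) (1 + pre.length)
      = c :: pre ++ suf.map (fun x => if x = c then '*' else x) := by
  induction suf generalizing pre with
  | nil =>
      rw [fixStartLoop.eq_def]
      simp
  | cons x t ih =>
      rw [fixStartLoop.eq_def]
      have hlt : 1 + pre.length < (c :: pre ++ x :: t).length := by simp; omega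
      rw [dif_pos hlt]
      have hget : (c :: pre ++ x :: t)[1 + pre.length]? = some x := by
        simp [Nat.add_comm]
      have hget0 : (c :: pre ++ x :: t)[0]? = some c := by simp
      have hset : (c :: pre ++ x :: t).set (1 + pre.length) '*' = c :: pre ++ '*' :: t := by
        have : (1 + pre.length) = (c :: pre).length + 0 := by simp [Nat.add_comm]
        simp [this, List.set_append_right, List.cons_append]
      rw [hget, hget0]
      by_cases hxc : x = c
      · rw [if_pos (by rw [hxc]), hset]
        have := ih (pre ++ ['*'])
        simp at this ⊢
        rw [show 1 + pre.length + 1 = 1 + (pre ++ ['*']).length by simp; omega] at *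
        simpa [hxc] using this
      · rw [if_neg (by simpa using hxc)]
        have := ih (pre ++ [x])
        rw [show 1 + pre.length + 1 = 1 + (pre ++ [x]).length by simp; omega]
        simpa [hxc] using this

-- Reference recursion for splitting on a single char: pieces between occurrences of c.
def splitCharAux (c : Char) (cur : List Char) : List Char → List (List Char)
  | [] => [cur]
  | x :: t => if x = c then cur :: splitCharAux c [] t else splitCharAux c (cur ++ [x]) t

theorem splitCharAux_ne_nil (c : Char) (cur l : List Char) : splitCharAux c cur l ≠ [] := by
  induction l generalizing cur with
  | nil => simp [splitCharAux]
  | cons x t ih =>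
      by_cases hxc : x = c <;> simp [splitCharAux, hxc, ih]

-- splitOn.go with a single-char separator computes splitCharAux (given enough fuel).
theorem splitOn_go_single (c : Char) (l : List Char) :
    ∀ (fuel : Nat) (cur : List Char) (acc : List (List Char)), l.length < fuel →
      PySem.Chars.splitOn.go [c] fuel l cur acc
        = acc.reverse ++ splitCharAux c cur.reverse l := by
  induction l with
  | nil =>
      intro fuel cur acc hf
      cases fuel with
      | zero => omega
      | succ f => rw [PySem.Chars.splitOn.go.eq_def]; simp [splitCharAux]
  | cons x t ih =>
      intro fuel cur acc hf
      cases fuel with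
      | zero => omega
      | succ f =>
          rw [PySem.Chars.splitOn.go.eq_def]
          simp only []
          by_cases hxc : c = x
          · rw [if_pos (by simp [List.isPrefixOf, hxc])]
            rw [show List.drop [c].length (x :: t) = t from rfl]
            rw [ih f [] (cur.reverse :: acc) (by simpa using Nat.lt_of_succ_lt_succ hf)]
            simp [splitCharAux, hxc.symm]
          · rw [if_neg (by simp [List.isPrefixOf]; exact fun h => hxc h)]
            rw [ih f (x :: cur) acc (by simpa using Nat.lt_of_succ_lt_succ hf)]
            have hcx : ¬ x = c := fun h => hxc h.symm
            simp [splitCharAux, hcx]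

theorem splitOn_single (c : Char) (l : List Char) :
    PySem.Chars.splitOn l [c] = splitCharAux c [] l := by
  rw [PySem.Chars.splitOn]
  simpa using splitOn_go_single c l (l.length + 1) [] [] (Nat.lt_succ_self _)

-- Joining the pieces with '*' rewrites every occurrence of c to '*'.
theorem join_splitCharAux (c : Char) (l cur : List Char) :
    PySem.Chars.join ['*'] (splitCharAux c cur l)
      = cur ++ l.map (fun x => if x = c then '*' else x) := by
  induction l generalizing cur with
  | nil => simp [splitCharAux, PySem.Chars.join_singleton]
  | cons x t ih =>
      by_cases hxc : x = c
      · obtain ⟨q, rest, hq⟩ : ∃ q rest, splitCharAux c [] t = q :: rest := by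
          cases h : splitCharAux c [] t with
          | nil => exact absurd h (splitCharAux_ne_nil c [] t)
          | cons q rest => exact ⟨q, rest, rfl⟩
        rw [splitCharAux, if_pos hxc, hq, PySem.Chars.join_cons_cons, ← hq, ih]
        simp [hxc]
      · rw [splitCharAux, if_neg hxc, ih]
        simp [hxc]

-- ===== VERDICT =====
theorem fix_start_spec : Claim_equal_fix_start := by
  intro s _
  unfold Spec_fix_start fix_start fix_start_alt
  by_cases hs : s = ""
  · subst hs
    rw [if_pos rfl]
    show String.ofList (fixStartLoop "".toList 1) = ""
    rw [show "".toList = ([] : List Char) from rfl, fixStartLoop.eq_def]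
    simp
  · rw [if_neg hs]
    obtain ⟨c, rest, hct⟩ : ∃ c rest, s.toList = c :: rest := by
      cases h : s.toList with
      | nil => exact absurd (String.toList_injective (by simp [h])) hs
      | cons c rest => exact ⟨c, rest, rfl⟩
    have hget : PySem.Str.pyGet? s 0 = some c := by simp [hct]
    simp only [hget]
    have hA : fixStartLoop s.toList 1
        = c :: rest.map (fun x => if x = c then '*' else x) := by
      rw [hct]
      simpa using fixStartLoop_inv rest [] c
    have hslice : (PySem.Str.slice s (some 1) none).toList = rest := by
      rw [PySem.Str.toList_slice]
      simp [hct, PySem.List.slice_from_one]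
    have hsplit : PySem.Str.split? (PySem.Str.slice s (some 1) none) (String.singleton c)
        = some ((splitCharAux c [] rest).map String.ofList) := by
      rw [PySem.Str.split?]
      simp [hslice, PySem.Chars.split?, String.singleton, splitOn_single]
    simp only [hsplit]
    apply String.toList_injective
    rw [String.toList_append, PySem.Str.join]
    simp only [String.toList_ofList, List.map_map]
    rw [show List.map (String.toList ∘ String.ofList) (splitCharAux c [] rest)
          = splitCharAux c [] rest by simp [Function.comp_def]]
    have hj := join_splitCharAux c rest []
    rw [show ("*".toList) = ['*'] from rfl, hj]
    simp [hA, String.singleton]
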